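-- pv_equiv track=rewrite | github.com/tnakaicode/jburkardt-python | subset/i4_bset.py | i4_bset
-- ===== SOURCE A (Python) =====
-- def i4_bset ( i4, pos ):
--
-- #*****************************************************************************80
-- #
-- ## I4_BSET returns a copy of an I4 in which the POS-th bit is set to 1.
-- #
-- #  Licensing:
-- #
-- #    This code is distributed under the GNU LGPL license.
-- #
-- #  Modified:
-- #
-- #    14 June 2015
-- #
-- #  Author:
-- #
-- #    John Burkardt
-- #
-- #  Reference:
-- #
-- #    Military Standard 1753,
-- #    FORTRAN, DoD Supplement To American National Standard X3.9-1978,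
-- #    9 November 1978.
-- #
-- #  Parameters:
-- #
-- #    Input, integer I4, the integer to be tested.
-- #
-- #    Input, integer POS, the bit position, between 0 and 31.
-- #
-- #    Output, integer VALUE, a copy of I4, but with the POS-th bit
-- #    set to 1.
-- #
--   i4_huge = 2147483647
--
--   value = i4
--
--   if ( pos < 0 ):
--
--     pass
--
--   elif ( pos < 31 ):
--
--     add = 1
--
--     if ( 0 <= i4 ):
--       j = i4
--     else:
--       j = ( i4_huge + i4 ) + 1
--
--     for k in range ( 0, pos ):
--       j = ( j // 2 )
--       add = add * 2
--
--     if ( ( j % 2 ) == 0 ):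
--       value = i4 + add
--
--   elif ( pos == 31 ):
--
--     if ( 0 < i4 ):
--       value = - ( i4_huge - i4 ) - 1
--
--   elif ( 31 < pos ):
--
--     value = i4
--
--   return value
-- ===== SOURCE B (Python) =====
-- def i4_bset(i4, pos):
--     if pos < 0 or 31 < pos:
--         return i4
--     if pos == 31:
--         return -(2147483647 - i4) - 1 if 0 < i4 else i4
--     j = i4 if 0 <= i4 else 2147483648 + i4
--     if (j // 2 ** pos) % 2 == 0:
--         return i4 + 2 ** pos
--     return i4
-- ===== Notes on version B (the rewrite author's own statement) =====
-- stated objective: simpler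
-- what changed: Replaced the O(pos) repeated-halving loop (which simultaneously builds add by doubling) with a direct closed-form bit test (j // 2**pos) % 2 and addend 2**pos, and flattened the branch chain into early returns.
import Mathlib
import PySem

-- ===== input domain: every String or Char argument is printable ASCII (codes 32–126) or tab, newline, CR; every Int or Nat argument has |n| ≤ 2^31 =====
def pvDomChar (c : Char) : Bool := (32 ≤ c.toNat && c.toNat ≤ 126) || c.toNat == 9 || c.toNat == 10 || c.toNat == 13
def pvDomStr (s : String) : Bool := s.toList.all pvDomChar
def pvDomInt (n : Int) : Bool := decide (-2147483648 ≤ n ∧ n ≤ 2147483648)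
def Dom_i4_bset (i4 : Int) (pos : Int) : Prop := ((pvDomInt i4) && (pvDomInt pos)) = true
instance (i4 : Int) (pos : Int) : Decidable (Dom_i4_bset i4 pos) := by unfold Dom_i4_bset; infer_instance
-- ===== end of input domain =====

-- B replaces A's O(pos) repeated-halving/doubling loop by a closed-form bit test
-- (j // 2^pos) % 2 with addend 2^pos, in a flat early-return branch chain (objective: simpler).


-- ===== PORT A =====
def i4_bset (i4 : Int) (pos : Int) : Int :=
  let i4_huge : Int := 2147483647
  let value := i4
  if pos < 0 then value
  else if pos < 31 then
    let add : Int := 1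
    let j : Int := if 0 ≤ i4 then i4 else (i4_huge + i4) + 1
    let p := (PySem.List.pyRange 0 pos 1).foldl
      (fun (p : Int × Int) _ => (PySem.Int.floordiv p.1 2, p.2 * 2)) (j, add)
    if PySem.Int.mod p.1 2 == 0 then i4 + p.2 else value
  else if pos == 31 then
    (if 0 < i4 then -(i4_huge - i4) - 1 else value)
  else value

-- ===== PORT B =====
def i4_bset_alt (i4 : Int) (pos : Int) : Int :=
  if pos < 0 || 31 < pos then i4
  else if pos == 31 then (if 0 < i4 then -(2147483647 - i4) - 1 else i4)
  else
    let j : Int := if 0 ≤ i4 then i4 else 2147483648 + i4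
    if PySem.Int.mod (PySem.Int.floordiv j (2 ^ pos.toNat)) 2 == 0 then i4 + 2 ^ pos.toNat
    else i4

-- ===== PRECONDITION & SPEC =====
def Spec_i4_bset (i4 : Int) (pos : Int) (out : Int) : Prop := out = i4_bset_alt i4 pos
instance (i4 : Int) (pos : Int) (out : Int) : Decidable (Spec_i4_bset i4 pos out) := by unfold Spec_i4_bset; infer_instance

-- ===== CLAIM (what is proved, stated in full; the proofs are below) =====
def Claim_equal_i4_bset : Prop := ∀ (i4 : Int) (pos : Int), Dom_i4_bset i4 pos → Spec_i4_bset i4 pos (i4_bset i4 pos)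

-- ===== LEMMAS AND PROOFS =====

-- A foldl that ignores the list elements is an iterate of its step function.
theorem foldl_const_iterate {α β : Type} (g : β → β) (l : List α) (s : β) :
    l.foldl (fun p _ => g p) s = g^[l.length] s := by
  induction l generalizing s with
  | nil => rfl
  | cons x xs ih => simp [List.foldl, Function.iterate_succ_apply, ih]

-- n repeated halvings of a nonnegative j (doubling the companion) = division by 2^n.
theorem iterate_halve (n : Nat) (j a : Int) (hj : 0 ≤ j) :
    (fun p : Int × Int => (PySem.Int.floordiv p.1 2, p.2 * 2))^[n] (j, a)
      = (PySem.Int.floordiv j (2 ^ n), a * 2 ^ n) := by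
  induction n generalizing j a with
  | zero =>
    simp [PySem.Int.floordiv]
  | succ n ih =>
    rw [Function.iterate_succ_apply]
    have h2 : (0:Int) < 2 := by norm_num
    have hhalf : (0:Int) ≤ PySem.Int.floordiv j 2 := by
      rw [PySem.Int.floordiv_eq_ediv_of_pos h2]
      exact Int.ediv_nonneg hj (by norm_num)
    rw [ih _ _ hhalf]
    have hp : (0:Int) < 2 ^ n := by positivity
    have hp1 : (0:Int) < 2 ^ (n + 1) := by positivity
    rw [PySem.Int.floordiv_eq_ediv_of_pos h2, PySem.Int.floordiv_eq_ediv_of_pos hp,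
        PySem.Int.floordiv_eq_ediv_of_pos hp1]
    simp only [Prod.mk.injEq]
    refine ⟨?_, by ring⟩
    rw [Int.ediv_ediv_of_nonneg (by norm_num : (0:Int) ≤ 2), pow_succ']

-- ===== VERDICT (by name: the statement is the Claim_ definition above) =====
theorem i4_bset_spec : Claim_equal_i4_bset := by
  intro i4 pos hdom
  have hdom' : -2147483648 ≤ i4 ∧ i4 ≤ 2147483648 := by
    simp [Dom_i4_bset, pvDomInt] at hdom; exact ⟨hdom.1.1, hdom.1.2⟩
  unfold Spec_i4_bset i4_bset i4_bset_alt
  by_cases h0 : pos < 0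
  · simp [h0]
  · by_cases h31 : pos < 31
    · -- the loop branch
      have hb : ¬ (pos < 0 || 31 < pos) = true := by simp; omega
      have hne : ¬ (pos == 31) = true := by simp; omega
      simp only [h0, h31, if_true, if_false, hne]
      have hj : (0:Int) ≤ (if 0 ≤ i4 then i4 else (2147483647 + i4) + 1) := by
        split <;> omega
      rw [foldl_const_iterate, PySem.List.length_pyRange_one,
          iterate_halve _ _ _ hj]
      have hlen : (pos - 0).toNat = pos.toNat := by omega
      have hjeq : (if 0 ≤ i4 then i4 else (2147483647 + i4) + 1)
          = (if 0 ≤ i4 then i4 else 2147483648 + i4) := by split <;> omega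
      rw [hlen, hjeq, one_mul]
      simp [show ¬ 31 < pos from by omega]
    · by_cases heq : pos = 31
      · simp [heq]
      · have : 31 < pos := by omega
        simp [h0, h31, show ¬ pos = 31 from heq, this]
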